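-- pv_equiv track=rewrite | github.com/devYuMinKim/Coding_Test_with_JavaScript | 20221005/모범답안/20221005_07/DifferenceTwoArray.py | solution
-- ===== SOURCE A (Python) =====
-- def solution(arr1, arr2):
--     """
--     :param arr1: int[]
--     :param arr2: int[]
--     :return: int[]
--     """
--
--     intersection = []
--
--     for i in range(len(arr1)):
--         for j in range(len(arr2)):
--             if arr1[i] == arr2[j]:
--                 intersection.append(arr1[i])
--
--     difference = []
--     difference.extend(getDiff(arr1, intersection))
--     difference.extend(getDiff(arr2, intersection))
--
--     difference.sort()
--
--     return difference
--
-- def getDiff(arr, ignore):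
--     result = []
--
--     for i in range(len(arr)):
--         isIntersection = False
--         for j in range(len(ignore)):
--             if arr[i] == ignore[j]:
--                 isIntersection = True
--         if not isIntersection:
--             result.append(arr[i])
--
--     return result
-- ===== SOURCE B (Python) =====
-- def solution(arr1, arr2):
--     a, b = sorted(arr1), sorted(arr2)
--     out, i, j = [], 0, 0
--     while i < len(a) and j < len(b):
--         if a[i] < b[j]:
--             out.append(a[i]); i += 1
--         elif b[j] < a[i]:
--             out.append(b[j]); j += 1
--         else:
--             v = a[i]
--             while i < len(a) and a[i] == v:
--                 i += 1
--             while j < len(b) and b[j] == v: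
--                 j += 1
--     out.extend(a[i:])
--     out.extend(b[j:])
--     return out
-- ===== Notes on version B (the rewrite author's own statement) =====
-- stated objective: faster
-- what changed: Instead of A's nested scans building an intersection list and filtering by membership before a final sort, B sorts each array first and then does a single two-pointer merge that emits elements in order while skipping equal runs present in both arrays.
import Mathlib
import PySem

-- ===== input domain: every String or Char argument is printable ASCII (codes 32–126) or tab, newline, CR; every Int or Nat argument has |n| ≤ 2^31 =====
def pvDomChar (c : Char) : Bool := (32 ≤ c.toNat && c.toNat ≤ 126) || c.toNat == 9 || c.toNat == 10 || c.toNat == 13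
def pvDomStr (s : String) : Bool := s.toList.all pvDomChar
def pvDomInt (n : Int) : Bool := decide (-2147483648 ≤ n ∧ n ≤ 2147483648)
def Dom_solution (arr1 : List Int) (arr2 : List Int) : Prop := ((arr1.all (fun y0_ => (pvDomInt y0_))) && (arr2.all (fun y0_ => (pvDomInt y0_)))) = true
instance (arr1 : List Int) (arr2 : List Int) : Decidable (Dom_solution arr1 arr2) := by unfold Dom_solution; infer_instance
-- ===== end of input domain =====

-- B sorts each array and then produces the answer by a single two-pointer merge that
-- skips equal runs present in both arrays, instead of A's nested membership scans
-- followed by a final sort: same return value by a different algorithm.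

-- ===== PORT A =====
def getDiffA (arr ignore : List Int) : List Int :=
  (PySem.List.pyRange 0 (arr.length : Int) 1).foldl (fun result i =>
    let x := PySem.List.pyGetD arr i 0
    let isIntersection := (PySem.List.pyRange 0 (ignore.length : Int) 1).foldl
      (fun b j => if x = PySem.List.pyGetD ignore j 0 then true else b) false
    if !isIntersection then result ++ [x] else result) []

def solution (arr1 : List Int) (arr2 : List Int) : List Int :=
  let intersection := (PySem.List.pyRange 0 (arr1.length : Int) 1).foldl (fun acc i =>
    (PySem.List.pyRange 0 (arr2.length : Int) 1).foldl (fun acc j =>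
      if PySem.List.pyGetD arr1 i 0 = PySem.List.pyGetD arr2 j 0
      then acc ++ [PySem.List.pyGetD arr1 i 0] else acc) acc) []
  let difference := ([] : List Int) ++ getDiffA arr1 intersection ++ getDiffA arr2 intersection
  PySem.List.sorted difference (fun x => x) false

-- ===== PORT B =====
-- the two-pointer while loop of Source B: recursion on the remaining suffixes a[i:], b[j:];
-- the inner run-skipping while loops are dropWhile on the suffix
def symmMerge : List Int → List Int → List Int
  | [], b => b
  | a, [] => a
  | x :: a, y :: b =>
    if x < y then x :: symmMerge a (y :: b)
    else if y < x then y :: symmMerge (x :: a) b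
    else symmMerge (a.dropWhile (fun z => z == x)) (b.dropWhile (fun z => z == x))
termination_by a b => a.length + b.length
decreasing_by
  · simp
  · simp
  · have h1 := List.length_dropWhile_le (fun z : Int => z == x) a
    have h2 := List.length_dropWhile_le (fun z : Int => z == x) b
    simp at *; omega

def solution_alt (arr1 : List Int) (arr2 : List Int) : List Int :=
  symmMerge (PySem.List.sorted arr1 (fun x => x) false) (PySem.List.sorted arr2 (fun x => x) false)

-- ===== PRECONDITION & SPEC =====
def Spec_solution (arr1 : List Int) (arr2 : List Int) (out : List Int) : Prop := out = solution_alt arr1 arr2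
instance (arr1 : List Int) (arr2 : List Int) (out : List Int) : Decidable (Spec_solution arr1 arr2 out) := by unfold Spec_solution; infer_instance

-- ===== CLAIM =====
def Claim_equal_solution : Prop := ∀ (arr1 : List Int) (arr2 : List Int), Dom_solution arr1 arr2 → Spec_solution arr1 arr2 (solution arr1 arr2)

-- ===== LEMMAS AND PROOFS =====

-- A's inner "isIntersection" loop is a membership test.
theorem foldl_or_mem (x : Int) (l : List Int) (b : Bool) :
    l.foldl (fun b y => if x = y then true else b) b = (b || decide (x ∈ l)) := by
  induction l generalizing b with
  | nil => simp
  | cons h t ih =>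
    simp only [List.foldl_cons, ih, List.mem_cons]
    by_cases hx : x = h <;> simp [hx]

-- membership in the inner append loop building A's intersection list
theorem mem_inner (x z : Int) (l : List Int) (acc : List Int) :
    z ∈ l.foldl (fun acc y => if x = y then acc ++ [x] else acc) acc ↔
      z ∈ acc ∨ (z = x ∧ x ∈ l) := by
  induction l generalizing acc with
  | nil => simp
  | cons h t ih =>
    simp only [List.foldl_cons, List.mem_cons]
    by_cases hx : x = h
    · subst hx
      rw [ih]
      simp
      tauto
    · simp only [if_neg hx, ih]
      constructor
      · rintro (h1 | ⟨h2, h3⟩) <;> tauto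
      · rintro (h1 | ⟨h2, (h3 | h4)⟩) <;> subst_eqs <;> tauto

-- membership in A's full intersection list
theorem mem_interA (arr1 arr2 : List Int) (acc : List Int) (z : Int) :
    z ∈ arr1.foldl (fun acc x =>
        arr2.foldl (fun acc y => if x = y then acc ++ [x] else acc) acc) acc ↔
      z ∈ acc ∨ (z ∈ arr1 ∧ z ∈ arr2) := by
  induction arr1 generalizing acc with
  | nil => simp
  | cons h t ih =>
    simp only [List.foldl_cons, ih, mem_inner, List.mem_cons]
    constructor
    · rintro ((h1 | ⟨h2, h3⟩) | ⟨h4, h5⟩) <;> subst_eqs <;> tauto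
    · rintro (h1 | ⟨(h2 | h3), h4⟩) <;> subst_eqs <;> tauto

-- getDiff is a filter by non-membership in `ignore`
theorem getDiffA_eq_filter (arr ignore : List Int) :
    getDiffA arr ignore = arr.filter (fun x => !decide (x ∈ ignore)) := by
  unfold getDiffA
  rw [PySem.List.foldl_pyRange_zero_pyGetD' arr 0
        (fun result x => if !((PySem.List.pyRange 0 (ignore.length : Int) 1).foldl
          (fun b j => if x = PySem.List.pyGetD ignore j 0 then true else b) false)
          then result ++ [x] else result) []]
  have h : ∀ x : Int, (PySem.List.pyRange 0 (ignore.length : Int) 1).foldl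
      (fun b j => if x = PySem.List.pyGetD ignore j 0 then true else b) false
      = decide (x ∈ ignore) := by
    intro x
    rw [PySem.List.foldl_pyRange_zero_pyGetD' ignore 0
          (fun b y => if x = y then true else b) false, foldl_or_mem]
    simp
  simp only [h]
  have := PySem.List.foldl_append_if (fun x => !decide (x ∈ ignore)) (fun x : Int => x) arr []
  simpa using this

-- the index-based intersection loops, rewritten as loops over the lists themselves
theorem inner_conv (arr2 : List Int) (y : Int) (acc : List Int) :
    (PySem.List.pyRange 0 (arr2.length : Int) 1).foldl
      (fun acc j => if y = PySem.List.pyGetD arr2 j 0 then acc ++ [y] else acc) acc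
      = arr2.foldl (fun acc z => if y = z then acc ++ [y] else acc) acc :=
  PySem.List.foldl_pyRange_zero_pyGetD' arr2 0 (fun acc z => if y = z then acc ++ [y] else acc) acc

-- A computes the sorted two-sided filter
theorem solution_eq_sorted_filter (arr1 arr2 : List Int) :
    solution arr1 arr2 = PySem.List.sorted
      (arr1.filter (fun x => !decide (x ∈ arr2)) ++ arr2.filter (fun x => !decide (x ∈ arr1)))
      (fun x => x) false := by
  unfold solution
  rw [PySem.List.foldl_pyRange_zero_pyGetD' arr1 0 (fun acc y =>
      (PySem.List.pyRange 0 (arr2.length : Int) 1).foldl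
        (fun acc j => if y = PySem.List.pyGetD arr2 j 0 then acc ++ [y] else acc) acc) []]
  simp only [inner_conv, getDiffA_eq_filter, List.nil_append]
  congr 1
  congr 1 <;>
  · refine List.filter_congr (fun x hx => ?_)
    simp [mem_interA, hx]

-- ---- B-side lemmas ----

-- unconditional equation lemmas for symmMerge
theorem symmMerge_nil_left (b : List Int) : symmMerge [] b = b := by
  rw [symmMerge]

theorem symmMerge_nil_right (x : Int) (a : List Int) : symmMerge (x :: a) [] = x :: a := by
  rw [symmMerge]
  simp

theorem symmMerge_cons_cons (x y : Int) (a b : List Int) :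
    symmMerge (x :: a) (y :: b) =
      (if x < y then x :: symmMerge a (y :: b)
       else if y < x then y :: symmMerge (x :: a) b
       else symmMerge (a.dropWhile (fun z => z == x)) (b.dropWhile (fun z => z == x))) := by
  rw [symmMerge]

theorem mem_symmMerge (a b : List Int) (z : Int) (h : z ∈ symmMerge a b) : z ∈ a ∨ z ∈ b := by
  induction a, b using symmMerge.induct with
  | case1 b =>
    rw [symmMerge_nil_left] at h
    exact Or.inr h
  | case2 a ha' =>
    obtain ⟨x, a', rfl⟩ := List.exists_cons_of_ne_nil (fun hh => ha' hh)
    rw [symmMerge_nil_right] at h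
    exact Or.inl h
  | case3 x a y b hlt ih =>
    rw [symmMerge_cons_cons, if_pos hlt] at h
    rcases List.mem_cons.1 h with h | h
    · exact Or.inl (by simp [h])
    · rcases ih h with h | h
      · exact Or.inl (List.mem_cons_of_mem _ h)
      · exact Or.inr h
  | case4 x a y b hlt hgt ih =>
    rw [symmMerge_cons_cons, if_neg hlt, if_pos hgt] at h
    rcases List.mem_cons.1 h with h | h
    · exact Or.inr (by simp [h])
    · rcases ih h with h | h
      · exact Or.inl h
      · exact Or.inr (List.mem_cons_of_mem _ h)
  | case5 x a y b hlt hgt ih =>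
    rw [symmMerge_cons_cons, if_neg hlt, if_neg hgt] at h
    rcases ih h with h | h
    · exact Or.inl (List.mem_cons_of_mem _ ((List.dropWhile_sublist _).subset h))
    · exact Or.inr (List.mem_cons_of_mem _ ((List.dropWhile_sublist _).subset h))

theorem pairwise_symmMerge (a b : List Int)
    (ha : a.Pairwise (· ≤ ·)) (hb : b.Pairwise (· ≤ ·)) :
    (symmMerge a b).Pairwise (· ≤ ·) := by
  induction a, b using symmMerge.induct with
  | case1 b => rw [symmMerge_nil_left]; exact hb
  | case2 a ha' =>
    obtain ⟨x, a', rfl⟩ := List.exists_cons_of_ne_nil (fun hh => ha' hh)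
    rw [symmMerge_nil_right]
    exact ha
  | case3 x a y b hlt ih =>
    rw [symmMerge_cons_cons, if_pos hlt]
    rw [List.pairwise_cons] at ha ⊢
    refine ⟨fun z hz => ?_, ih ha.2 hb⟩
    rcases mem_symmMerge _ _ _ hz with h | h
    · exact ha.1 z h
    · rcases List.mem_cons.1 h with h | h
      · omega
      · have := (List.pairwise_cons.1 hb).1 z h; omega
  | case4 x a y b hlt hgt ih =>
    rw [symmMerge_cons_cons, if_neg hlt, if_pos hgt]
    rw [List.pairwise_cons] at hb ⊢
    refine ⟨fun z hz => ?_, ih ha hb.2⟩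
    rcases mem_symmMerge _ _ _ hz with h | h
    · rcases List.mem_cons.1 h with h | h
      · omega
      · have := (List.pairwise_cons.1 ha).1 z h; omega
    · exact hb.1 z h
  | case5 x a y b hlt hgt ih =>
    rw [symmMerge_cons_cons, if_neg hlt, if_neg hgt]
    exact ih ((List.pairwise_cons.1 ha).2.sublist (List.dropWhile_sublist _))
             ((List.pairwise_cons.1 hb).2.sublist (List.dropWhile_sublist _))

-- membership is unchanged by dropping a leading run of x's, for elements ≠ x
theorem mem_dropWhile_ne (x z : Int) (hzx : z ≠ x) (b : List Int) :
    z ∈ b.dropWhile (fun w => w == x) ↔ z ∈ b := by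
  induction b with
  | nil => simp
  | cons h t ih =>
    by_cases hx : h = x
    · subst hx; simpa [List.dropWhile_cons, hzx] using ih
    · simp [hx]

-- after dropping the leading run of x's from a sorted tail of x, everything is > x
theorem gt_of_mem_dropWhile (x : Int) (a : List Int)
    (hp : a.Pairwise (· ≤ ·)) (hge : ∀ z ∈ a, x ≤ z) :
    ∀ z ∈ a.dropWhile (fun w => w == x), x < z := by
  induction a with
  | nil => simp
  | cons h t ih =>
    intro z hz
    by_cases hx : h = x
    · subst hx
      rw [List.dropWhile_cons_of_pos (by simp)] at hz
      exact ih (List.pairwise_cons.1 hp).2 (fun w hw => hge w (List.mem_cons_of_mem _ hw)) z hz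
    · rw [List.dropWhile_cons_of_neg (by simp [hx])] at hz
      rcases List.mem_cons.1 hz with h1 | h1
      · subst h1; have := hge z List.mem_cons_self; omega
      · have h2 := (List.pairwise_cons.1 hp).1 z h1
        have h3 := hge h List.mem_cons_self
        rcases lt_or_eq_of_le h3 with h4 | h4
        · omega
        · exact absurd h4.symm hx

-- filtering by non-membership ignores a leading equal run on both sides
theorem filter_drop_run (x : Int) (a b : List Int)
    (hpa : (x :: a).Pairwise (· ≤ ·)) :
    (x :: a).filter (fun z => !decide (z ∈ x :: b)) =
      (a.dropWhile (fun z => z == x)).filter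
        (fun z => !decide (z ∈ b.dropWhile (fun z => z == x))) := by
  have hga : ∀ z ∈ a, x ≤ z := (List.pairwise_cons.1 hpa).1
  have hgt := gt_of_mem_dropWhile x a (List.pairwise_cons.1 hpa).2 hga
  rw [List.filter_cons_of_neg (by simp)]
  conv_lhs => rw [← List.takeWhile_append_dropWhile (p := fun z : Int => z == x) (l := a)]
  rw [List.filter_append]
  have htw : (a.takeWhile (fun z => z == x)).filter (fun z => !decide (z ∈ x :: b)) = [] := by
    rw [List.filter_eq_nil_iff]
    intro z hz
    have : z = x := by simpa using List.mem_takeWhile_imp hz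
    simp [this]
  rw [htw, List.nil_append]
  refine List.filter_congr (fun z hz => ?_)
  have hxz : x < z := hgt z hz
  have hne : z ≠ x := by omega
  simp [hne, mem_dropWhile_ne x z hne b]

theorem perm_symmMerge (a b : List Int)
    (ha : a.Pairwise (· ≤ ·)) (hb : b.Pairwise (· ≤ ·)) :
    (symmMerge a b).Perm
      (a.filter (fun z => !decide (z ∈ b)) ++ b.filter (fun z => !decide (z ∈ a))) := by
  induction a, b using symmMerge.induct with
  | case1 b => simp [symmMerge_nil_left]
  | case2 a ha' =>
    obtain ⟨x, a', rfl⟩ := List.exists_cons_of_ne_nil (fun hh => ha' hh)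
    rw [symmMerge_nil_right]
    simp
  | case3 x a y b hlt ih =>
    have ha' := List.pairwise_cons.1 ha
    have hb' := List.pairwise_cons.1 hb
    have hxnb : x ∉ y :: b := by
      intro h
      rcases List.mem_cons.1 h with h | h
      · omega
      · have := hb'.1 x h; omega
    have hfb : (y :: b).filter (fun z => !decide (z ∈ x :: a)) =
        (y :: b).filter (fun z => !decide (z ∈ a)) := by
      refine List.filter_congr (fun z hz => ?_)
      have : x < z := by
        rcases List.mem_cons.1 hz with h | h
        · omega
        · have := hb'.1 z h; omega
      have hne : z ≠ x := by omega
      simp [hne]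
    rw [symmMerge_cons_cons, if_pos hlt, hfb,
        List.filter_cons_of_pos (by simp [hxnb]), List.cons_append]
    exact (ih ha'.2 hb).cons x
  | case4 x a y b hlt hgt ih =>
    have ha' := List.pairwise_cons.1 ha
    have hb' := List.pairwise_cons.1 hb
    have hynb : y ∉ x :: a := by
      intro h
      rcases List.mem_cons.1 h with h | h
      · omega
      · have := ha'.1 y h; omega
    have hfa : (x :: a).filter (fun z => !decide (z ∈ y :: b)) =
        (x :: a).filter (fun z => !decide (z ∈ b)) := by
      refine List.filter_congr (fun z hz => ?_)
      have : y < z := by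
        rcases List.mem_cons.1 hz with h | h
        · omega
        · have := ha'.1 z h; omega
      have hne : z ≠ y := by omega
      simp [hne]
    rw [symmMerge_cons_cons, if_neg hlt, if_pos hgt, hfa,
        List.filter_cons_of_pos (l := b) (by simp [hynb])]
    refine ((ih ha hb'.2).cons y).trans ?_
    exact List.perm_middle.symm
  | case5 x a y b hlt hgt ih =>
    have hxy : x = y := by omega
    subst hxy
    have ha' := List.pairwise_cons.1 ha
    have hb' := List.pairwise_cons.1 hb
    rw [symmMerge_cons_cons, if_neg hlt, if_neg hgt]
    rw [filter_drop_run x a b ha, filter_drop_run x b a hb]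
    exact ih (ha'.2.sublist (List.dropWhile_sublist _))
             (hb'.2.sublist (List.dropWhile_sublist _))

-- ===== VERDICT =====
theorem solution_spec : Claim_equal_solution := by
  intro arr1 arr2 _
  unfold Spec_solution solution_alt
  rw [solution_eq_sorted_filter]
  set s1 := PySem.List.sorted arr1 (fun x => x) false with hs1
  set s2 := PySem.List.sorted arr2 (fun x => x) false with hs2
  have hp1 : s1.Pairwise (· ≤ ·) := PySem.List.sorted_pairwise arr1 (fun x => x)
  have hp2 : s2.Pairwise (· ≤ ·) := PySem.List.sorted_pairwise arr2 (fun x => x)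
  refine PySem.List.sorted_id_eq_of_perm_of_pairwise _ _ ?_ (pairwise_symmMerge _ _ hp1 hp2)
  refine (perm_symmMerge _ _ hp1 hp2).trans ?_
  have e1 : s1.filter (fun z => !decide (z ∈ s2)) = s1.filter (fun z => !decide (z ∈ arr2)) :=
    List.filter_congr (fun z _ => by simp [hs2, PySem.List.mem_sorted])
  have e2 : s2.filter (fun z => !decide (z ∈ s1)) = s2.filter (fun z => !decide (z ∈ arr1)) :=
    List.filter_congr (fun z _ => by simp [hs1, PySem.List.mem_sorted])
  rw [e1, e2]
  exact ((PySem.List.sorted_perm arr1 (fun x => x) false).filter _).append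
        ((PySem.List.sorted_perm arr2 (fun x => x) false).filter _)
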